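-- pv_equiv track=rewrite | github.com/lelong88/nspaceresearch | design-curriculums/original-novels/the-little-bookshop-by-the-sea/validate_content.py | check_property_3
-- ===== SOURCE A (Python) =====
-- def check_property_3(ch_num, content):
--     """Property 3: Session and activity structure."""
--     sessions = content["learningSessions"]
--     errors = []
--
--     if len(sessions) != 6:
--         errors.append(f"Expected 6 sessions, got {len(sessions)}")
--         return errors
--
--     for i in range(5):
--         acts = sessions[i]["activities"]
--         types = [a["activityType"] for a in acts]
--         expected = ["viewFlashcards", "reading", "readAlong"]
--         if types != expected:
--             errors.append(f"Session {i}: expected {expected}, got {types}")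
--
--     acts6 = sessions[5]["activities"]
--     types6 = [a["activityType"] for a in acts6]
--     expected6 = ["viewFlashcards", "readAlong"]
--     if types6 != expected6:
--         errors.append(f"Session 5: expected {expected6}, got {types6}")
--
--     return errors
-- ===== SOURCE B (Python) =====
-- def _go(i, rest):
--     """Recursively validate the remaining sessions, building errors back-to-front."""
--     if not rest:
--         return []
--     expected = (["viewFlashcards", "readAlong"] if len(rest) == 1
--                 else ["viewFlashcards", "reading", "readAlong"])
--     types = [a["activityType"] for a in rest[0]["activities"]]
--     tail = _go(i + 1, rest[1:])
--     if types != expected: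
--         return [f"Session {i}: expected {expected}, got {types}"] + tail
--     return tail
--
--
-- def check_property_3(ch_num, content):
--     """Property 3: Session and activity structure (recursive descent over the session list)."""
--     sessions = content["learningSessions"]
--     if len(sessions) != 6:
--         return [f"Expected 6 sessions, got {len(sessions)}"]
--     return _go(0, sessions)
-- ===== Notes on version B (the rewrite author's own statement) =====
-- stated objective: alternative
-- what changed: Replaces A's index-driven range(5) loop with an errors accumulator plus a hand-written session-5 block by a structural recursion over the session list that picks the expected type list from whether the current session is the last one and builds the error list back-to-front by prepending.
import Mathlib
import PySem

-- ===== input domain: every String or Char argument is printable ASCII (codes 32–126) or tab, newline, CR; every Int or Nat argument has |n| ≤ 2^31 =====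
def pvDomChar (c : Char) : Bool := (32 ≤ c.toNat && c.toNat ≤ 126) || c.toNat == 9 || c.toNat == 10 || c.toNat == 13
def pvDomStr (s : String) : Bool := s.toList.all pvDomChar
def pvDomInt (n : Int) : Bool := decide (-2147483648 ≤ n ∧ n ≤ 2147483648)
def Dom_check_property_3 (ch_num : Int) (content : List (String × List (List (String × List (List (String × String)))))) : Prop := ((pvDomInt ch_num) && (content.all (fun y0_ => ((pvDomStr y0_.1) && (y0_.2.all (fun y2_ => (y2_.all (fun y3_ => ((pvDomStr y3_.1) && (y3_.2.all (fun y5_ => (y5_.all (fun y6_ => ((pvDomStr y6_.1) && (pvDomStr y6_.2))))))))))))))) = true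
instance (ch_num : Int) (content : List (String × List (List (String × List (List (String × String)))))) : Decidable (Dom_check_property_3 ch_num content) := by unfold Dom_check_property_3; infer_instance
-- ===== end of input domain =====

-- B replaces A's index-driven loop + special-cased session-5 block by a structural recursion
-- over the session list (expected list chosen by "is this the last session?", errors built
-- back-to-front by prepending); objective: alternative decomposition, same cost.

-- Shared formatting helpers (the f-strings are identical in A and B):
-- Python repr of a str; exact for the Dom character set (printable ASCII plus tab/newline/CR).
def pyReprChars (cs : List Char) : List Char :=
  let q : Char := if cs.contains '\'' && !cs.contains '"' then '"' else '\''
  q :: cs.flatMap (fun c =>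
    if c = '\\' then ['\\', '\\']
    else if c = q then ['\\', q]
    else if c = Char.ofNat 9 then ['\\', 't']
    else if c = Char.ofNat 10 then ['\\', 'n']
    else if c = Char.ofNat 13 then ['\\', 'r']
    else [c]) ++ [q]

-- Python str(list of str): '[' + ', '.join(repr(x)) + ']'
def pyReprStrList (xs : List String) : List Char :=
  '[' :: (List.intercalate [',', ' '] (xs.map (fun s => pyReprChars s.toList))) ++ [']']

-- f"Session {i}: expected {exp}, got {got}"
def sessionMsg (i : Int) (exp got : List String) : String :=
  String.ofList ("Session ".toList ++ PySem.Int.toChars i ++ ": expected ".toList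
    ++ pyReprStrList exp ++ ", got ".toList ++ pyReprStrList got)

-- types = [a["activityType"] for a in s["activities"]]  (the defaults are never reached under Pre_)
def typesOf (s : List (String × List (List (String × String)))) : List String :=
  ((PySem.Dict.mk s).getD "activities" []).map (fun a => (PySem.Dict.mk a).getD "activityType" "")

-- ===== PORT A =====
def check_property_3 (ch_num : Int) (content : List (String × List (List (String × List (List (String × String)))))) : List String :=
  let sessions := (PySem.Dict.mk content).getD "learningSessions" []   -- KeyError excluded by Pre_
  let errors : List String := []
  if sessions.length ≠ 6 then
    errors ++ [String.ofList ("Expected 6 sessions, got ".toList ++ PySem.Int.toChars (sessions.length : Int))]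
  else
    let errors := (PySem.List.pyRange 0 5 1).foldl (fun errors i =>
      let types := typesOf (PySem.List.pyGetD sessions i [])
      if types ≠ ["viewFlashcards", "reading", "readAlong"] then
        errors ++ [sessionMsg i ["viewFlashcards", "reading", "readAlong"] types]
      else errors) errors
    let types6 := typesOf (PySem.List.pyGetD sessions 5 [])
    if types6 ≠ ["viewFlashcards", "readAlong"] then
      errors ++ [sessionMsg 5 ["viewFlashcards", "readAlong"] types6]
    else errors

-- ===== PORT B =====
-- _go(i, rest): structural recursion over the remaining sessions, errors built back-to-front
def goB (i : Int) (rest : List (List (String × List (List (String × String))))) : List String :=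
  match rest with
  | [] => []
  | s :: rs =>
    let expected := if rest.length = 1 then ["viewFlashcards", "readAlong"]
                    else ["viewFlashcards", "reading", "readAlong"]
    let types := typesOf s
    let tail := goB (i + 1) rs
    if types ≠ expected then sessionMsg i expected types :: tail else tail

def check_property_3_alt (ch_num : Int) (content : List (String × List (List (String × List (List (String × String)))))) : List String :=
  let sessions := (PySem.Dict.mk content).getD "learningSessions" []   -- KeyError excluded by Pre_
  if sessions.length ≠ 6 then
    [String.ofList ("Expected 6 sessions, got ".toList ++ PySem.Int.toChars (sessions.length : Int))]
  else
    goB 0 sessions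

-- ===== PRECONDITION & SPEC =====
-- Pre_ excludes exactly the inputs where Python A raises KeyError: a content dict without
-- "learningSessions", and (when there are exactly 6 sessions) a session without "activities"
-- or an activity without "activityType".
def Pre_check_property_3 (ch_num : Int) (content : List (String × List (List (String × List (List (String × String)))))) : Prop :=
  let ls := (PySem.Dict.mk content).get? "learningSessions"
  ls.isSome = true ∧
  ((ls.getD []).length = 6 →
    ((ls.getD []).all (fun s =>
      match (PySem.Dict.mk s).get? "activities" with
      | none => false
      | some acts => acts.all (fun a => ((PySem.Dict.mk a).get? "activityType").isSome))) = true)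
instance (ch_num : Int) (content : List (String × List (List (String × List (List (String × String)))))) : Decidable (Pre_check_property_3 ch_num content) := by unfold Pre_check_property_3; infer_instance

def pvWitness_check_property_3 : Int × (List (String × List (List (String × List (List (String × String)))))) :=
  (0, [("learningSessions", [])])

def Spec_check_property_3 (ch_num : Int) (content : List (String × List (List (String × List (List (String × String)))))) (out : List String) : Prop := out = check_property_3_alt ch_num content
instance (ch_num : Int) (content : List (String × List (List (String × List (List (String × String)))))) (out : List String) : Decidable (Spec_check_property_3 ch_num content out) := by unfold Spec_check_property_3; infer_instance

-- ===== CLAIM =====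
def Claim_equal_check_property_3 : Prop := ∀ (ch_num : Int) (content : List (String × List (List (String × List (List (String × String)))))), Dom_check_property_3 ch_num content → Pre_check_property_3 ch_num content → Spec_check_property_3 ch_num content (check_property_3 ch_num content)

-- ===== LEMMAS AND PROOFS =====

-- The two ports agree on every input (the defaults make both total in the same way).
set_option maxHeartbeats 1000000 in
theorem ports_agree (ch_num : Int) (content : List (String × List (List (String × List (List (String × String)))))) :
    check_property_3 ch_num content = check_property_3_alt ch_num content := by
  unfold check_property_3 check_property_3_alt
  generalize (PySem.Dict.mk content).getD "learningSessions" [] = sessions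
  by_cases h : sessions.length = 6
  · obtain ⟨s0, s1, s2, s3, s4, s5, rfl⟩ :
        ∃ a b c d e f, sessions = [a, b, c, d, e, f] := by
      rcases sessions with _ | ⟨a, _ | ⟨b, _ | ⟨c, _ | ⟨d, _ | ⟨e, _ | ⟨f, _ | ⟨g, r⟩⟩⟩⟩⟩⟩⟩ <;>
        first
          | exact ⟨_, _, _, _, _, _, rfl⟩
          | simp at h
    rw [show PySem.List.pyRange 0 5 1 = [0, 1, 2, 3, 4] from by decide]
    simp only [goB, List.length_cons, List.length_nil, List.foldl_cons, List.foldl_nil,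
      PySem.List.pyGetD_ofNat']
    norm_num
    split_ifs <;> simp
  · simp [h]

-- ===== VERDICT =====
theorem check_property_3_spec : Claim_equal_check_property_3 := by
  intro ch_num content _ _
  exact ports_agree ch_num content
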